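-- pv_equiv track=rewrite | github.com/tomokveld/WisecondorFF | src/main.py | inflate_results
-- ===== SOURCE A (Python) =====
-- def inflate_results(results, rem_input):
--     temp = [0 for x in rem_input["mask"]]
--     j = 0
--     for i, val in enumerate(rem_input["mask"]):
--         if val:
--             temp[i] = results[j]
--             j += 1
--     return temp
-- ===== SOURCE B (Python) =====
-- def inflate_results(results, rem_input):
--     stack = list(reversed(results))
--     return [stack.pop() if v else 0 for v in rem_input["mask"]]
-- ===== Notes on version B (the rewrite author's own statement) =====
-- stated objective: alternative
-- what changed: B builds the output directly in a single comprehension, consuming the results as a reversed stack popped on each truthy mask entry, instead of A's preallocated zero array mutated by indexed scatter writes driven by a running counter.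
import Mathlib
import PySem

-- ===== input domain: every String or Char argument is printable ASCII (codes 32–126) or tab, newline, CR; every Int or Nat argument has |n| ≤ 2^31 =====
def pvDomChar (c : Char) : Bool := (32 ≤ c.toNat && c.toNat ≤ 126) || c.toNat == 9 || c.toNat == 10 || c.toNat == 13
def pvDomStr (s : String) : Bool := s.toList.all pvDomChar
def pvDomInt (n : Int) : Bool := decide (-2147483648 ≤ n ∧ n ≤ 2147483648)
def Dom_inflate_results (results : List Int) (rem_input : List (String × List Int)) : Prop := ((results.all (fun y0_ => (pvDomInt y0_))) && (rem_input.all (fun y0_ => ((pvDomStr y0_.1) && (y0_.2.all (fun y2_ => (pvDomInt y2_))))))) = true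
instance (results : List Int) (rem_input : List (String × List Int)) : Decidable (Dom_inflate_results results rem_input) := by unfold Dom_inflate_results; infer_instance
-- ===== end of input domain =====

-- B builds the output directly in one comprehension, consuming the results as a
-- reversed stack popped on each truthy mask entry, instead of A's preallocated
-- zero array mutated by indexed scatter writes with a running counter (alternative
-- decomposition, same linear cost).

-- ===== PORT A =====
-- A's loop: for i, val in enumerate(mask): if val: temp[i] = results[j]; j += 1
def inflA (results : List Int) : List (Int × Int) → List Int → Int → List Int
  | [], temp, _ => temp
  | (i, v) :: rest, temp, j =>
    if v ≠ 0 then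
      inflA results rest (PySem.List.pySetD temp i (PySem.List.pyGetD results j 0)) (j + 1)
    else
      inflA results rest temp j

def inflate_results (results : List Int) (rem_input : List (String × List Int)) : List Int :=
  let mask := ((PySem.Dict.mk rem_input).get? "mask").getD []
  inflA results (PySem.List.enumerate mask 0) (mask.map (fun _ => (0 : Int))) 0

-- ===== PORT B =====
-- B's comprehension: [stack.pop() if v else 0 for v in mask], stack popped at its end
def inflB : List Int → List Int → List Int
  | _, [] => []
  | stack, v :: rest =>
    if v ≠ 0 then (stack.getLast?.getD 0) :: inflB stack.dropLast rest
    else (0 : Int) :: inflB stack rest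

def inflate_results_alt (results : List Int) (rem_input : List (String × List Int)) : List Int :=
  let mask := ((PySem.Dict.mk rem_input).get? "mask").getD []
  inflB results.reverse mask

-- ===== PRECONDITION & SPEC =====
-- Pre_ excludes exactly the inputs where the Python A raises: a missing "mask" key
-- (KeyError) or fewer results than truthy mask entries (IndexError).
def Pre_inflate_results (results : List Int) (rem_input : List (String × List Int)) : Prop :=
  (PySem.Dict.mk rem_input).get? "mask" ≠ none ∧
  (((PySem.Dict.mk rem_input).get? "mask").getD []).countP (fun v => v != 0) ≤ results.length

instance (results : List Int) (rem_input : List (String × List Int)) : Decidable (Pre_inflate_results results rem_input) := by unfold Pre_inflate_results; infer_instance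

def pvWitness_inflate_results : List Int × (List (String × List Int)) :=
  ([5, 7], [("mask", [0, 1, 0, 1])])

def Spec_inflate_results (results : List Int) (rem_input : List (String × List Int)) (out : List Int) : Prop := out = inflate_results_alt results rem_input
instance (results : List Int) (rem_input : List (String × List Int)) (out : List Int) : Decidable (Spec_inflate_results results rem_input out) := by unfold Spec_inflate_results; infer_instance

-- ===== CLAIM (what is proved, stated in full; the proofs are below) =====
def Claim_equal_inflate_results : Prop := ∀ (results : List Int) (rem_input : List (String × List Int)), Dom_inflate_results results rem_input → Pre_inflate_results results rem_input → Spec_inflate_results results rem_input (inflate_results results rem_input)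

-- ===== LEMMAS AND PROOFS =====

-- Reference gather consuming the result stream from the front.
def pvGather : List Int → List Int → List Int
  | _, [] => []
  | res, v :: rest =>
    if v ≠ 0 then (res.headD 0) :: pvGather res.tail rest
    else (0 : Int) :: pvGather res rest

-- B's end-popping stack is the front-consuming gather of the unreversed results.
theorem inflB_eq_gather (st mask : List Int) :
    inflB st mask = pvGather st.reverse mask := by
  induction mask generalizing st with
  | nil => rfl
  | cons v rest ih =>
    by_cases hv : v = 0
    · simp [inflB, pvGather, hv, ih]
    · simp [inflB, pvGather, hv, ih, ← List.head?_reverse, List.headD_eq_head?_getD,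
        List.tail_reverse]

-- A's fused scatter loop, started after a processed prefix, appends exactly the gather.
theorem inflA_eq_gather (results : List Int) (mask pre : List Int) (j : Nat) :
    inflA results (PySem.List.enumerate mask (pre.length : Int))
      (pre ++ List.replicate mask.length 0) (j : Int)
    = pre ++ pvGather (results.drop j) mask := by
  induction mask generalizing pre j with
  | nil => simp [PySem.List.enumerate, inflA, pvGather]
  | cons v rest ih =>
    rw [PySem.List.enumerate_cons]
    by_cases hv : v = 0
    · have h := ih (pre ++ [(0 : Int)]) j
      simp only [List.length_append, List.length_cons, List.append_assoc, List.singleton_append, Nat.cast_add, Nat.cast_one] at h ⊢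
      simpa [inflA, hv, List.length_replicate] using h
    · have h := ih (pre ++ [PySem.List.pyGetD results (j : Int) 0]) (j + 1)
      simp only [List.length_append, List.length_cons, List.length_nil, List.append_assoc,
        List.singleton_append, Nat.cast_add, Nat.cast_one, zero_add] at h
      simp only [inflA, hv, ne_eq, not_false_iff, if_true, PySem.List.pySetD_natCast,
        List.length_cons]
      have hset : (pre ++ List.replicate (rest.length + 1) (0 : Int)).set pre.length
          (PySem.List.pyGetD results (j : Int) 0)
          = pre ++ PySem.List.pyGetD results (j : Int) 0 :: List.replicate rest.length 0 := by
        rw [List.replicate_succ, List.set_append_right _ _ (Nat.le_refl _)]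
        simp
      rw [hset, h]
      simp [pvGather, hv, PySem.List.pyGetD_natCast, List.tail_drop]

-- ===== VERDICT (by name: the statement is the Claim_ definition above) =====
theorem inflate_results_spec : Claim_equal_inflate_results := by
  intro results rem_input _ _
  have hA := inflA_eq_gather results (((PySem.Dict.mk rem_input).get? "mask").getD []) [] 0
  simp only [List.length_nil, Nat.cast_zero, List.nil_append, List.drop_zero] at hA
  simp only [Spec_inflate_results, inflate_results, inflate_results_alt, List.map_const']
  rw [hA, inflB_eq_gather, List.reverse_reverse]
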